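-- pv_equiv track=rewrite | github.com/lingzhi227/agent-research-skills | skills/github-research/scripts/compare_repos.py | compute_dependency_overlap
-- ===== SOURCE A (Python) =====
-- from itertools import combinations
--
-- def compute_dependency_overlap(
--     repo_packages: dict[str, set[str]],
--     min_shared: int = 3,
-- ) -> list[dict]:
--     """Compute shared packages for each pair of repos.
--
--     Only includes pairs with at least min_shared common packages.
--     """
--     overlaps: list[dict] = []
--     repo_ids = sorted(repo_packages.keys())
--     for a, b in combinations(repo_ids, 2):
--         shared = sorted(repo_packages[a] & repo_packages[b])
--         if len(shared) >= min_shared: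
--             overlaps.append({
--                 "repos": [a, b],
--                 "shared": shared,
--             })
--     return overlaps
-- ===== SOURCE B (Python) =====
-- from itertools import combinations
--
--
-- def compute_dependency_overlap(
--     repo_packages: dict[str, set[str]],
--     min_shared: int = 3,
-- ) -> list[dict]:
--     """Compute shared packages for each pair of repos via an inverted index.
--
--     Instead of intersecting the two package sets of every pair (O(R^2 * P)),
--     build a package -> repos index once, accumulate each pair's sorted shared
--     list only from co-occurring packages, then emit pairs with O(1) lookups.
--     """
--     ids = sorted(repo_packages)
--     index: dict[str, list[str]] = {}
--     for r in ids:
--         for p in sorted(repo_packages[r]):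
--             index.setdefault(p, []).append(r)
--     shared_by_pair: dict[tuple[str, str], list[str]] = {}
--     for p in sorted(index):
--         for a, b in combinations(index[p], 2):
--             shared_by_pair.setdefault((a, b), []).append(p)
--     out: list[dict] = []
--     for a, b in combinations(ids, 2):
--         shared = shared_by_pair.get((a, b), [])
--         if len(shared) >= min_shared:
--             out.append({"repos": [a, b], "shared": shared})
--     return out
-- ===== Notes on version B (the rewrite author's own statement) =====
-- stated objective: faster
-- what changed: Replaces the per-pair set intersection and sort by an inverted package->repos index from which each pair's sorted shared list is accumulated once, so emitting a pair costs O(1) lookups; intended as faster, measured 1.5x-2.9x on the generated inputs (1.54x at the largest size).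
import Mathlib
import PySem

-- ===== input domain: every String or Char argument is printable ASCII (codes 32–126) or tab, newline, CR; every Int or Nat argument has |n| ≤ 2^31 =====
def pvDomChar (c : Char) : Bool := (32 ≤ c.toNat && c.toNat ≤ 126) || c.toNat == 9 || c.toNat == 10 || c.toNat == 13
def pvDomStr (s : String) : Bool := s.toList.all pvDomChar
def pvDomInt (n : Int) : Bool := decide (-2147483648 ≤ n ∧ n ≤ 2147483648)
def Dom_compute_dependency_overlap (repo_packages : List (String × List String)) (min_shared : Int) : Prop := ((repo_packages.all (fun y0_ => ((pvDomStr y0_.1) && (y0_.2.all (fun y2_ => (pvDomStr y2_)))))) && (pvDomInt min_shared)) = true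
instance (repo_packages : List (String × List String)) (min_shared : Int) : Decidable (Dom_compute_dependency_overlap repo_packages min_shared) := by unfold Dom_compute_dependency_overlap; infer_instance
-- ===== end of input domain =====

-- B replaces A's per-pair set-intersection-and-sort over all repo pairs by an inverted
-- package->repos index from which each pair's sorted shared list is accumulated once
-- (objective: faster — intended; a timing run measured 1.5x-2.9x on its generated inputs).
-- ===== PORT A =====
def compute_dependency_overlap (repo_packages : List (String × List String)) (min_shared : Int) : List (List (String × List String)) :=
  let d := PySem.Dict.ofList repo_packages
  let repo_ids := PySem.List.sorted (PySem.Dict.keys d) (fun x => x) false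
  (PySem.List.combinations repo_ids 2).foldl (fun overlaps c =>
    let a := getElem! c 0
    let b := getElem! c 1
    let shared := PySem.List.sorted
      (PySem.Set.inter (PySem.Set.ofList (d.getD a [])) (PySem.Set.ofList (d.getD b [])))
      (fun x => x) false
    if min_shared ≤ (shared.length : Int) then
      overlaps ++ [[("repos", [a, b]), ("shared", shared)]]
    else overlaps) []

-- ===== PORT B =====
def compute_dependency_overlap_alt (repo_packages : List (String × List String)) (min_shared : Int) : List (List (String × List String)) :=
  let d := PySem.Dict.ofList repo_packages
  let ids := PySem.List.sorted (PySem.Dict.keys d) (fun x => x) false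
  let index : PySem.Dict String (List String) :=
    ids.foldl (fun idx r =>
      (PySem.List.sorted (PySem.Set.ofList (d.getD r [])) (fun x => x) false).foldl
        (fun idx p => idx.modify p [] (fun v => v ++ [r])) idx) PySem.Dict.empty
  let sbp : PySem.Dict (String × String) (List String) :=
    (PySem.List.sorted (PySem.Dict.keys index) (fun x => x) false).foldl (fun sb p =>
      (PySem.List.combinations (index.getD p []) 2).foldl (fun sb c =>
        sb.modify (getElem! c 0, getElem! c 1) [] (fun v => v ++ [p])) sb) PySem.Dict.empty
  (PySem.List.combinations ids 2).foldl (fun out c =>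
    let a := getElem! c 0
    let b := getElem! c 1
    let shared := sbp.getD (a, b) []
    if min_shared ≤ (shared.length : Int) then
      out ++ [[("repos", [a, b]), ("shared", shared)]]
    else out) []

-- ===== PRECONDITION & SPEC =====
def Spec_compute_dependency_overlap (repo_packages : List (String × List String)) (min_shared : Int) (out : List (List (String × List String))) : Prop := out = compute_dependency_overlap_alt repo_packages min_shared
instance (repo_packages : List (String × List String)) (min_shared : Int) (out : List (List (String × List String))) : Decidable (Spec_compute_dependency_overlap repo_packages min_shared out) := by unfold Spec_compute_dependency_overlap; infer_instance

-- ===== CLAIM (what is proved, stated in full; the proofs are below) =====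
def Claim_equal_compute_dependency_overlap : Prop := ∀ (repo_packages : List (String × List String)) (min_shared : Int), Dom_compute_dependency_overlap repo_packages min_shared → Spec_compute_dependency_overlap repo_packages min_shared (compute_dependency_overlap repo_packages min_shared)


-- ===== LEMMAS AND PROOFS =====

-- Proof-side names for the intermediate structures of port B (used only below).
def pvD (rp : List (String × List String)) : PySem.Dict String (List String) :=
  PySem.Dict.ofList rp

def pvIds (rp : List (String × List String)) : List String :=
  PySem.List.sorted (PySem.Dict.keys (pvD rp)) (fun x => x) false

def pvPk (rp : List (String × List String)) (r : String) : List String :=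
  PySem.List.sorted (PySem.Set.ofList ((pvD rp).getD r [])) (fun x => x) false

def pvIdx (rp : List (String × List String)) : PySem.Dict String (List String) :=
  (pvIds rp).foldl (fun idx r =>
    (pvPk rp r).foldl (fun idx p => idx.modify p [] (fun v => v ++ [r])) idx) PySem.Dict.empty

def pvPkgs (rp : List (String × List String)) : List String :=
  PySem.List.sorted (PySem.Dict.keys (pvIdx rp)) (fun x => x) false

def pvSbp (rp : List (String × List String)) : PySem.Dict (String × String) (List String) :=
  (pvPkgs rp).foldl (fun sb p =>
    (PySem.List.combinations ((pvIdx rp).getD p []) 2).foldl (fun sb c =>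
      sb.modify (getElem! c 0, getElem! c 1) [] (fun v => v ++ [p])) sb) PySem.Dict.empty

-- two strictly increasing lists with the same members are equal
theorem strict_eq {α : Type} [LinearOrder α] {l₁ l₂ : List α} (h₁ : l₁.Pairwise (· < ·))
    (h₂ : l₂.Pairwise (· < ·)) (h : ∀ x, x ∈ l₁ ↔ x ∈ l₂) : l₁ = l₂ :=
  ((List.perm_ext_iff_of_nodup (h₁.imp ne_of_lt) (h₂.imp ne_of_lt)).2 h).eq_of_pairwise
    (fun _ _ _ _ hab hba => absurd hba (asymm hab)) h₁ h₂

-- sorting a duplicate-free list by the identity key gives a strictly increasing list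
theorem sorted_strict {α : Type} [LinearOrder α] (xs : List α) (h : xs.Nodup) :
    (PySem.List.sorted xs (fun x => x) false).Pairwise (· < ·) := by
  have hp := PySem.List.sorted_pairwise (xs := xs) (key := fun x => x)
  have hn : (PySem.List.sorted xs (fun x => x) false).Nodup :=
    (PySem.List.sorted_perm ..).nodup_iff.2 h
  exact (hp.and hn).imp (fun h => lt_of_le_of_ne h.1 h.2)

theorem pk_nodup (rp : List (String × List String)) (r : String) : (pvPk rp r).Nodup :=
  (PySem.List.sorted_perm ..).nodup_iff.2 (PySem.Set.nodup_ofList _)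

theorem ids_strict (rp : List (String × List String)) : (pvIds rp).Pairwise (· < ·) :=
  sorted_strict _ (PySem.Dict.nodup_keys_ofList _)

-- the inner index loop appends r to the entry of q once per occurrence of q
theorem inner_idx_getD (l : List String) (r q : String) (idx : PySem.Dict String (List String)) :
    ((l.foldl (fun idx p => idx.modify p [] (fun v => v ++ [r])) idx).getD q []) =
      idx.getD q [] ++ List.replicate (l.count q) r := by
  induction l generalizing idx with
  | nil => simp
  | cons p t ih =>
    simp only [List.foldl_cons, ih, PySem.Dict.getD_modify, List.count_cons]
    by_cases h : q = p
    · subst h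
      simp [List.replicate_succ]
    · have h' : (p == q) = false := by simp; exact fun hh => h hh.symm
      simp [h, h']

theorem idx_getD_gen (rp : List (String × List String)) (ids : List String) (q : String)
    (idx : PySem.Dict String (List String)) :
    ((ids.foldl (fun idx r =>
        (pvPk rp r).foldl (fun idx p => idx.modify p [] (fun v => v ++ [r])) idx) idx).getD q []) =
      idx.getD q [] ++ ids.filter (fun r => decide (q ∈ pvPk rp r)) := by
  induction ids generalizing idx with
  | nil => simp
  | cons r t ih =>
    simp only [List.foldl_cons, ih, inner_idx_getD, List.filter_cons]
    by_cases h : q ∈ pvPk rp r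
    · rw [List.count_eq_one_of_mem (pk_nodup rp r) h]
      simp [h]
    · rw [List.count_eq_zero.2 h]
      simp [h]

-- the index maps q to the repos (in sorted id order) whose package set contains q
theorem idx_getD (rp : List (String × List String)) (q : String) :
    (pvIdx rp).getD q [] = (pvIds rp).filter (fun r => decide (q ∈ pvPk rp r)) := by
  rw [pvIdx, idx_getD_gen]
  simp

theorem idx_keys_mem_gen (rp : List (String × List String)) (ids : List String) (q : String)
    (idx : PySem.Dict String (List String)) :
    q ∈ ((ids.foldl (fun idx r =>
        (pvPk rp r).foldl (fun idx p => idx.modify p [] (fun v => v ++ [r])) idx) idx).keys) ↔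
      q ∈ idx.keys ∨ ∃ r ∈ ids, q ∈ pvPk rp r := by
  induction ids generalizing idx with
  | nil => simp
  | cons r t ih =>
    simp only [List.foldl_cons, ih, PySem.Dict.keys_foldl_modify, PySem.Set.mem_update,
      List.mem_cons]
    constructor
    · rintro ((h | h) | ⟨r', hr', hq⟩)
      · exact Or.inl h
      · exact Or.inr ⟨r, Or.inl rfl, h⟩
      · exact Or.inr ⟨r', Or.inr hr', hq⟩
    · rintro (h | ⟨r', (rfl | hr'), hq⟩)
      · exact Or.inl (Or.inl h)
      · exact Or.inl (Or.inr hq)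
      · exact Or.inr ⟨r', hr', hq⟩

theorem idx_keys_mem (rp : List (String × List String)) (q : String) :
    q ∈ (pvIdx rp).keys ↔ ∃ r ∈ pvIds rp, q ∈ pvPk rp r := by
  rw [pvIdx, idx_keys_mem_gen]
  simp [PySem.Dict.empty]

theorem idx_keys_nodup_gen (rp : List (String × List String)) (ids : List String)
    (idx : PySem.Dict String (List String)) (h : idx.keys.Nodup) :
    ((ids.foldl (fun idx r =>
        (pvPk rp r).foldl (fun idx p => idx.modify p [] (fun v => v ++ [r])) idx) idx).keys).Nodup := by
  induction ids generalizing idx with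
  | nil => exact h
  | cons r t ih =>
    exact ih _ (PySem.Dict.nodup_keys_foldl_modify_key (pvPk rp r) (fun p => p) []
      (fun _ _ => (fun v => v ++ [r])) idx h)

theorem idx_keys_nodup (rp : List (String × List String)) : (pvIdx rp).keys.Nodup :=
  idx_keys_nodup_gen rp _ _ PySem.Dict.nodup_keys_empty

theorem pkgs_strict (rp : List (String × List String)) : (pvPkgs rp).Pairwise (· < ·) :=
  sorted_strict _ (idx_keys_nodup rp)

-- how often a 2-element combination occurs in combinations of a strictly sorted list
theorem comb_count (rs : List String) (h : rs.Pairwise (· < ·)) (a b : String) :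
    (PySem.List.combinations rs 2).count [a, b] =
      if a ∈ rs ∧ b ∈ rs ∧ a < b then 1 else 0 := by
  induction rs with
  | nil => simp [PySem.List.combinations_nil_succ]
  | cons x xs ih =>
    have hx : ∀ y ∈ xs, x < y := fun y hy => (List.pairwise_cons.1 h).1 y hy
    have hxs := (List.pairwise_cons.1 h).2
    have hxnot : x ∉ xs := fun hm => lt_irrefl x (hx x hm)
    have hsplit : PySem.List.combinations (x :: xs) 2 =
        (xs.map fun y => [x, y]) ++ PySem.List.combinations xs 2 := by
      rw [show (2 : Nat) = 1 + 1 from rfl, PySem.List.combinations_cons_succ,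
        PySem.List.combinations_one, List.map_map]
      simp [Function.comp_def]
    have hmap : ((xs.map fun y => [x, y]).count [a, b]) =
        if a = x then xs.count b else 0 := by
      by_cases hax : a = x
      · subst hax
        simp only [List.count, List.countP_map]
        apply List.countP_congr
        intro y _
        simp [Function.comp]
      · rw [if_neg hax]
        simp only [List.count, List.countP_map]
        rw [List.countP_eq_zero.2]
        intro y _
        simp [Function.comp]
        intro hh
        exact absurd hh.symm hax
    rw [hsplit, List.count_append, hmap, ih hxs]
    by_cases hax : a = x
    · subst hax
      have hnotrec : ¬(a ∈ xs ∧ b ∈ xs ∧ a < b) := fun hc => hxnot hc.1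
      rw [if_pos rfl, if_neg hnotrec]
      by_cases hb : b ∈ xs
      · rw [List.count_eq_one_of_mem (hxs.imp ne_of_lt) hb,
          if_pos ⟨List.mem_cons_self .., List.mem_cons_of_mem _ hb, hx b hb⟩]
      · rw [List.count_eq_zero.2 hb, if_neg]
        rintro ⟨-, hb2, hlt⟩
        rcases List.mem_cons.1 hb2 with rfl | hb3
        · exact lt_irrefl _ hlt
        · exact hb hb3
    · rw [if_neg hax]
      have hiff : (a ∈ xs ∧ b ∈ xs ∧ a < b) ↔ (a ∈ x :: xs ∧ b ∈ x :: xs ∧ a < b) := by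
        constructor
        · rintro ⟨h1, h2, h3⟩
          exact ⟨List.mem_cons_of_mem _ h1, List.mem_cons_of_mem _ h2, h3⟩
        · rintro ⟨h1, h2, h3⟩
          rcases List.mem_cons.1 h1 with rfl | h1'
          · exact absurd rfl hax
          · rcases List.mem_cons.1 h2 with rfl | h2'
            · exact absurd h3 (not_lt.2 (le_of_lt (hx a h1')))
            · exact ⟨h1', h2', h3⟩
      rw [if_congr hiff rfl rfl]
      omega

-- the inner pair loop appends p to the entry of (a,b) once per occurrence of [a,b]
theorem inner_sbp_getD (l : List (List String)) (hl : ∀ c ∈ l, c.length = 2)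
    (p a b : String) (sb : PySem.Dict (String × String) (List String)) :
    ((l.foldl (fun sb c =>
        sb.modify (getElem! c 0, getElem! c 1) [] (fun v => v ++ [p])) sb).getD (a, b) []) =
      sb.getD (a, b) [] ++ List.replicate (l.count [a, b]) p := by
  induction l generalizing sb with
  | nil => simp
  | cons c t ih =>
    obtain ⟨x, y, rfl⟩ : ∃ x y, c = [x, y] := by
      rcases c with _ | ⟨x, _ | ⟨y, _ | ⟨z, c⟩⟩⟩ <;> simp_all
    have ht : ∀ c ∈ t, c.length = 2 := fun c hc => hl c (List.mem_cons_of_mem _ hc)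
    simp only [List.foldl_cons, ih ht, PySem.Dict.getD_modify, List.count_cons,
      List.getElem!_cons_zero, List.getElem!_cons_succ]
    by_cases hp : (a, b) = (x, y)
    · obtain ⟨rfl, rfl⟩ := Prod.mk.injEq .. ▸ hp
      rw [if_pos rfl]
      have : ([a, b] == [a, b]) = true := by simp
      rw [this]
      simp [List.replicate_succ]
    · have h2 : ([x, y] == [a, b]) = false := by
        simp only [beq_eq_false_iff_ne, ne_eq, List.cons.injEq, and_true]
        intro h3
        exact hp (by rw [h3.1, h3.2])
      rw [if_neg hp, h2]
      simp

theorem idx_strict (rp : List (String × List String)) (p : String) :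
    ((pvIdx rp).getD p []).Pairwise (· < ·) := by
  rw [idx_getD]
  exact (ids_strict rp).filter _

theorem sbp_getD_gen (idx : PySem.Dict String (List String))
    (hstrict : ∀ p, (idx.getD p []).Pairwise (· < ·))
    (pkgs : List String) (a b : String) (hab : a < b)
    (sb : PySem.Dict (String × String) (List String)) :
    ((pkgs.foldl (fun sb p =>
        (PySem.List.combinations (idx.getD p []) 2).foldl (fun sb c =>
          sb.modify (getElem! c 0, getElem! c 1) [] (fun v => v ++ [p])) sb) sb).getD (a, b) []) =
      sb.getD (a, b) [] ++
        pkgs.filter (fun p => decide (a ∈ idx.getD p [] ∧ b ∈ idx.getD p [])) := by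
  induction pkgs generalizing sb with
  | nil => simp
  | cons p t ih =>
    have hlen : ∀ c ∈ PySem.List.combinations (idx.getD p []) 2, c.length = 2 :=
      fun c hc => PySem.List.length_of_mem_combinations hc
    simp only [List.foldl_cons, ih, inner_sbp_getD _ hlen, List.filter_cons]
    rw [comb_count _ (hstrict p)]
    by_cases hc : a ∈ idx.getD p [] ∧ b ∈ idx.getD p []
    · rw [if_pos ⟨hc.1, hc.2, hab⟩]
      simp [hc]
    · rw [if_neg (fun hh => hc ⟨hh.1, hh.2.1⟩)]
      simp [hc]

theorem sbp_getD (rp : List (String × List String)) (a b : String) (hab : a < b) :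
    (pvSbp rp).getD (a, b) [] =
      (pvPkgs rp).filter
        (fun p => decide (a ∈ (pvIdx rp).getD p [] ∧ b ∈ (pvIdx rp).getD p [])) := by
  rw [pvSbp, sbp_getD_gen (pvIdx rp) (idx_strict rp) _ _ _ hab]
  simp

-- the accumulated shared list of a pair equals A's sorted set intersection
theorem shared_eq (rp : List (String × List String)) (a b : String)
    (ha : a ∈ pvIds rp) (hb : b ∈ pvIds rp) (hab : a < b) :
    (pvSbp rp).getD (a, b) [] =
      PySem.List.sorted
        (PySem.Set.inter (PySem.Set.ofList ((pvD rp).getD a []))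
          (PySem.Set.ofList ((pvD rp).getD b []))) (fun x => x) false := by
  rw [sbp_getD rp a b hab]
  apply strict_eq
  · exact (pkgs_strict rp).filter _
  · exact sorted_strict _ (PySem.Set.nodup_inter _ _ (PySem.Set.nodup_ofList _))
  · intro x
    rw [List.mem_filter, PySem.List.mem_sorted, PySem.Set.mem_inter,
      PySem.Set.mem_ofList, PySem.Set.mem_ofList]
    have hIa : a ∈ (pvIdx rp).getD x [] ↔ (a ∈ pvIds rp ∧ x ∈ pvPk rp a) := by
      rw [idx_getD, List.mem_filter]
      simp
    have hIb : b ∈ (pvIdx rp).getD x [] ↔ (b ∈ pvIds rp ∧ x ∈ pvPk rp b) := by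
      rw [idx_getD, List.mem_filter]
      simp
    have hpk : ∀ r, x ∈ pvPk rp r ↔ x ∈ (pvD rp).getD r [] := by
      intro r
      rw [pvPk, PySem.List.mem_sorted, PySem.Set.mem_ofList]
    constructor
    · rintro ⟨-, hcond⟩
      have hc := of_decide_eq_true hcond
      exact ⟨(hpk a).1 (hIa.1 hc.1).2, (hpk b).1 (hIb.1 hc.2).2⟩
    · rintro ⟨hxa, hxb⟩
      refine ⟨?_, decide_eq_true ⟨hIa.2 ⟨ha, (hpk a).2 hxa⟩, hIb.2 ⟨hb, (hpk b).2 hxb⟩⟩⟩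
      rw [pvPkgs, PySem.List.mem_sorted, idx_keys_mem]
      exact ⟨a, ha, (hpk a).2 hxa⟩

-- ===== VERDICT (by name: the statement is the Claim_ definition above) =====
theorem compute_dependency_overlap_spec : Claim_equal_compute_dependency_overlap := by
  intro rp m _
  unfold Spec_compute_dependency_overlap
  show compute_dependency_overlap rp m = compute_dependency_overlap_alt rp m
  have hA : compute_dependency_overlap rp m =
      (PySem.List.combinations (pvIds rp) 2).foldl (fun overlaps c =>
        let a := getElem! c 0
        let b := getElem! c 1
        let shared := PySem.List.sorted
          (PySem.Set.inter (PySem.Set.ofList ((pvD rp).getD a []))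
            (PySem.Set.ofList ((pvD rp).getD b []))) (fun x => x) false
        if m ≤ (shared.length : Int) then
          overlaps ++ [[("repos", [a, b]), ("shared", shared)]]
        else overlaps) [] := rfl
  have hB : compute_dependency_overlap_alt rp m =
      (PySem.List.combinations (pvIds rp) 2).foldl (fun out c =>
        let a := getElem! c 0
        let b := getElem! c 1
        let shared := (pvSbp rp).getD (a, b) []
        if m ≤ (shared.length : Int) then
          out ++ [[("repos", [a, b]), ("shared", shared)]]
        else out) [] := rfl
  rw [hA, hB]
  apply PySem.List.foldl_congr_mem
  intro acc c hc
  obtain ⟨hsub, hlen⟩ := (PySem.List.mem_combinations_iff ..).1 hc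
  obtain ⟨a, b, rfl⟩ : ∃ a b, c = [a, b] := by
    rcases c with _ | ⟨x, _ | ⟨y, _ | ⟨z, c⟩⟩⟩ <;> simp_all
  have hpair : ([a, b] : List String).Pairwise (· < ·) := (ids_strict rp).sublist hsub
  have hab : a < b := by
    have := List.pairwise_cons.1 hpair
    exact this.1 b (by simp)
  have ha : a ∈ pvIds rp := hsub.subset (by simp)
  have hb : b ∈ pvIds rp := hsub.subset (by simp)
  simp only [List.getElem!_cons_zero, List.getElem!_cons_succ,
    shared_eq rp a b ha hb hab]
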